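-- pv_equiv track=rewrite | github.com/DeliciousBuding/MCMICM | develop-problem-C/src/dwts_model/engines/cp_rank.py | simulate_elimination
-- ===== SOURCE A (Python) =====
-- from typing import Dict, List, Tuple, Optional, Set
--
-- def simulate_elimination(
--
--     fan_ranks: Dict[str, int],
--     judge_ranks: Dict[str, int],
-- ) -> str:
--     """
--     模拟排名制下的淘汰选手。
--
--     Returns: 被淘汰者（组合排名最高/最差）
--     """
--     combined = {}
--     for contestant in fan_ranks:
--         fan_r = fan_ranks.get(contestant, len(fan_ranks))
--         judge_r = judge_ranks.get(contestant, len(judge_ranks))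
--         combined[contestant] = fan_r + judge_r
--
--     return max(combined.items(), key=lambda x: x[1])[0]
-- ===== SOURCE B (Python) =====
-- def simulate_elimination(fan_ranks, judge_ranks):
--     """Stable reverse sort by combined rank; head = worst (first maximal under ties)."""
--     jn = len(judge_ranks)
--     ranked = sorted(fan_ranks.items(),
--                     key=lambda p: p[1] + judge_ranks.get(p[0], jn),
--                     reverse=True)
--     return ranked[0][0]
-- ===== Notes on version B (the rewrite author's own statement) =====
-- stated objective: alternative
-- what changed: B replaces A's combined-score dict plus max(..., key=...) scan by a stable reverse sort of fan_ranks.items() on the combined score and returns the head; stability of Python's sort preserves max's first-occurrence tie-breaking.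
-- outside the precondition, e.g. on simulate_elimination({}, {}): A raises ValueError, B raises IndexError
import Mathlib
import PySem

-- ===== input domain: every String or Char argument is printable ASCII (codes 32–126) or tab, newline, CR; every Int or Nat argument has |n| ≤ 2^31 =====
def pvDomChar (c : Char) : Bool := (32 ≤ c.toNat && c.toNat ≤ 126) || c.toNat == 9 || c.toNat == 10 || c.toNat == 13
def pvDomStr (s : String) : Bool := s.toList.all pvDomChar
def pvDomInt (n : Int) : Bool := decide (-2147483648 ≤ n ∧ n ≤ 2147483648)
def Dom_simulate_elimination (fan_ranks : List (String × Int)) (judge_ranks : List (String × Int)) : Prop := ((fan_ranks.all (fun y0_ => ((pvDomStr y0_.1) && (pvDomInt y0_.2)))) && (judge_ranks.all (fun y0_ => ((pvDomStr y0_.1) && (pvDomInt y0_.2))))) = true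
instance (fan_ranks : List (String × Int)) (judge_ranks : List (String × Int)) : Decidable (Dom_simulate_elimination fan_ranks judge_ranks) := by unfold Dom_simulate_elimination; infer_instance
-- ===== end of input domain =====

-- B replaces A's combined dict + max(..., key) scan by a stable reverse sort on the combined score, returning the head (alternative algorithm, same result by sort stability).
-- The dict parameters arrive as association lists; both ports first form the Python dicts (PySem.Dict.ofList = dict(pairs)).

-- ===== PORT A =====
def simulate_elimination (fan_ranks : List (String × Int)) (judge_ranks : List (String × Int)) : String :=
  let fd := PySem.Dict.ofList fan_ranks
  let jd := PySem.Dict.ofList judge_ranks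
  -- combined = {};  for contestant in fan_ranks: combined[contestant] = fan_r + judge_r
  let combined : PySem.Dict String Int :=
    fd.keys.foldl
      (fun d contestant =>
        d.insert contestant (fd.getD contestant fd.size + jd.getD contestant jd.size))
      PySem.Dict.empty
  -- max(combined.items(), key=lambda x: x[1])[0]   (ValueError on empty: excluded by Pre_)
  match PySem.List.max? combined.items (fun x => x.2) with
  | some m => m.1
  | none => ""

-- ===== PORT B =====
def simulate_elimination_alt (fan_ranks : List (String × Int)) (judge_ranks : List (String × Int)) : String :=
  let fd := PySem.Dict.ofList fan_ranks
  let jd := PySem.Dict.ofList judge_ranks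
  let jn : Int := jd.size
  -- ranked = sorted(fan_ranks.items(), key=lambda p: p[1] + judge_ranks.get(p[0], jn), reverse=True)
  let ranked := PySem.List.sorted fd.items (fun p => p.2 + jd.getD p.1 jn) true
  -- return ranked[0][0]   (IndexError on empty: excluded by Pre_)
  match ranked with
  | p :: _ => p.1
  | [] => ""

-- ===== PRECONDITION & SPEC =====
-- Pre_ excludes only the empty fan_ranks, on which A's max() raises ValueError (and B's ranked[0] raises IndexError).
def Pre_simulate_elimination (fan_ranks : List (String × Int)) (judge_ranks : List (String × Int)) : Prop := fan_ranks ≠ []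
instance (fan_ranks : List (String × Int)) (judge_ranks : List (String × Int)) : Decidable (Pre_simulate_elimination fan_ranks judge_ranks) := by unfold Pre_simulate_elimination; infer_instance

def pvWitness_simulate_elimination : (List (String × Int)) × (List (String × Int)) := ([("a", 1), ("b", 2)], [("b", 1)])

def Spec_simulate_elimination (fan_ranks : List (String × Int)) (judge_ranks : List (String × Int)) (out : String) : Prop := out = simulate_elimination_alt fan_ranks judge_ranks
instance (fan_ranks : List (String × Int)) (judge_ranks : List (String × Int)) (out : String) : Decidable (Spec_simulate_elimination fan_ranks judge_ranks out) := by unfold Spec_simulate_elimination; infer_instance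

-- ===== CLAIM =====
def Claim_equal_simulate_elimination : Prop := ∀ (fan_ranks : List (String × Int)) (judge_ranks : List (String × Int)), Dom_simulate_elimination fan_ranks judge_ranks → Pre_simulate_elimination fan_ranks judge_ranks → Spec_simulate_elimination fan_ranks judge_ranks (simulate_elimination fan_ranks judge_ranks)

-- ===== LEMMAS AND PROOFS =====

-- A's combined dict lists exactly (c, score c) for the keys of fd, in order.
theorem combined_items (fd jd : PySem.Dict String Int) (hnd : fd.keys.Nodup) :
    (fd.keys.foldl
      (fun d contestant =>
        d.insert contestant (fd.getD contestant fd.size + jd.getD contestant jd.size))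
      PySem.Dict.empty).items
    = fd.keys.map (fun c => (c, fd.getD c fd.size + jd.getD c jd.size)) := by
  have h := PySem.Dict.items_foldl_insert_fresh (l := fd.keys) (k := fun c => c)
    (v := fun c => fd.getD c fd.size + jd.getD c jd.size) (d := PySem.Dict.empty)
    (by intro a _; simp [PySem.Dict.contains_empty])
    (by simpa using hnd)
  simpa using h

-- The key-indexed score list over fd.keys is the item-indexed score list over fd.items.
theorem keys_map_eq_items_map (fd jd : PySem.Dict String Int) (hnd : fd.keys.Nodup) :
    fd.keys.map (fun c => (c, fd.getD c fd.size + jd.getD c jd.size))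
    = fd.items.map (fun p => (p.1, p.2 + jd.getD p.1 jd.size)) := by
  have hk : fd.keys = fd.items.map (fun p => p.1) := rfl
  rw [hk, List.map_map]
  refine List.map_congr_left ?_
  intro p hp
  have : fd.getD p.1 fd.size = p.2 :=
    PySem.Dict.getD_of_mem_items fd (by simpa using hp) hnd fd.size
  simp [Function.comp, this]

-- folding the max-step over a (name, score)-decorated list is the decorated fold over the base list.
theorem foldl_map_decorate {α : Type} (f : α → String × Int)
    (stepP : Option (String × Int) → (String × Int) → Option (String × Int))
    (stepS : Option α → α → Option α)
    (hstep : ∀ (acc : Option α) (x : α), stepP (Option.map f acc) (f x) = Option.map f (stepS acc x))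
    (xs : List α) (acc : Option α) :
    List.foldl stepP (Option.map f acc) (xs.map f) = Option.map f (List.foldl stepS acc xs) := by
  induction xs generalizing acc with
  | nil => rfl
  | cons x xs ih =>
      simp only [List.map_cons, List.foldl_cons]
      rw [hstep, ih]

-- Python's max(decorated, key=snd) is the decorated max(base, key=sc).
theorem max?_decorate {α : Type} (sc : α → Int) (f : α → String × Int)
    (hf : ∀ p, (f p).2 = sc p) (xs : List α) :
    PySem.List.max? (xs.map f) (fun x => x.2) = Option.map f (PySem.List.max? xs sc) := by
  unfold PySem.List.max?
  refine foldl_map_decorate f _ _ ?_ xs none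
  intro acc x
  cases acc with
  | none => rfl
  | some m =>
      simp only [Option.map_some, apply_ite, hf]
      split <;> rfl

-- the head of a descending stable insertion is the running max (first maximal).
theorem head?_insertBy {α : Type} (key : α → Int) (x : α) (acc : List α) :
    (PySem.List.insertBy (fun a b => decide (key b < key a)) x acc).head?
    = (match acc.head? with
       | none => some x
       | some m => if key m < key x then some x else some m) := by
  cases acc with
  | nil => rfl
  | cons y ys =>
      simp only [PySem.List.insertBy, List.head?_cons]
      split <;> simp_all

-- Python's max(..., key) equals the head of the stable reverse sort by the same key.
theorem max?_eq_head_sorted_rev {α : Type} (xs : List α) (key : α → Int) :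
    PySem.List.max? xs key = (PySem.List.sorted xs key true).head? := by
  rw [PySem.List.sorted_rev_eq_foldl_insertBy]
  unfold PySem.List.max?
  suffices h : ∀ (acc : List α),
      (List.foldl (fun acc x => PySem.List.insertBy (fun a b => decide (key b < key a)) x acc) acc xs).head?
      = List.foldl (fun acc x => match acc with
          | none => some x
          | some m => if key m < key x then some x else some m) acc.head? xs by
    exact (h []).symm
  induction xs with
  | nil => intro acc; rfl
  | cons x xs ih =>
      intro acc
      simp only [List.foldl_cons]
      rw [ih, head?_insertBy]

theorem simulate_elimination_spec : Claim_equal_simulate_elimination := by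
  intro fan judge _ _
  have hnd := PySem.Dict.nodup_keys_ofList fan
  unfold Spec_simulate_elimination
  simp only [simulate_elimination, simulate_elimination_alt]
  rw [combined_items _ _ hnd, keys_map_eq_items_map _ _ hnd]
  rw [max?_decorate
        (fun p => p.2 + (PySem.Dict.ofList judge).getD p.1 (PySem.Dict.ofList judge).size)
        _ (fun _ => rfl)]
  have h := max?_eq_head_sorted_rev (PySem.Dict.ofList fan).items
      (fun p => p.2 + (PySem.Dict.ofList judge).getD p.1 (PySem.Dict.ofList judge).size)
  cases hs : PySem.List.sorted (PySem.Dict.ofList fan).items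
      (fun p => p.2 + (PySem.Dict.ofList judge).getD p.1 (PySem.Dict.ofList judge).size) true with
  | nil => rw [hs] at h; simp only [List.head?_nil] at h; rw [h]; rfl
  | cons p t => rw [hs] at h; simp only [List.head?_cons] at h; rw [h]; rfl
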